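-- pv_equiv track=rewrite | github.com/DingleBells/usacopractice | yearofthecow.py | determineYearsApart
-- ===== SOURCE A (Python) =====
-- zodiacYears = ["Ox", "Tiger", "Rabbit", "Dragon", "Snake", "Horse", "Goat", "Monkey", "Rooster", "Dog", "Pig", "Rat"]
--
-- zodiacDict = {
-- "Ox":0, "Tiger":1, "Rabbit":2, "Dragon":3, "Snake":4, "Horse":5, "Goat":6, "Monkey":7,
--                  "Rooster":8, "Dog":9, "Pig":10, "Rat":11
-- }
--
-- def determineYearsApart(z1, z2, next):
--     years = 0
--     curindex = zodiacDict[z1]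
--
--     while True:
--         if zodiacYears[curindex] == z2 and years != 0:
--             return years
--         if next:
--             curindex = (curindex + 1) % 12
--             years += 1
--         else:
--             if curindex == 0:
--                 curindex = 11
--             else:
--                 curindex -= 1
--             years -= 1
-- ===== SOURCE B (Python) =====
-- zodiacYears = ["Ox", "Tiger", "Rabbit", "Dragon", "Snake", "Horse", "Goat", "Monkey", "Rooster", "Dog", "Pig", "Rat"]
--
-- zodiacDict = {
-- "Ox":0, "Tiger":1, "Rabbit":2, "Dragon":3, "Snake":4, "Horse":5, "Goat":6, "Monkey":7,
--                  "Rooster":8, "Dog":9, "Pig":10, "Rat":11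
-- }
--
-- def determineYearsApart(z1, z2, next):
--     i1 = zodiacDict[z1]
--     i2 = zodiacDict[z2]
--     if next:
--         return (i2 - i1 - 1) % 12 + 1
--     else:
--         return -((i1 - i2 - 1) % 12 + 1)
-- ===== Notes on version B (the rewrite author's own statement) =====
-- stated objective: simpler
-- what changed: Replaces the stepping while-loop over the zodiac cycle with a closed-form modular-arithmetic formula on the two dict indices.
import Mathlib
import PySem

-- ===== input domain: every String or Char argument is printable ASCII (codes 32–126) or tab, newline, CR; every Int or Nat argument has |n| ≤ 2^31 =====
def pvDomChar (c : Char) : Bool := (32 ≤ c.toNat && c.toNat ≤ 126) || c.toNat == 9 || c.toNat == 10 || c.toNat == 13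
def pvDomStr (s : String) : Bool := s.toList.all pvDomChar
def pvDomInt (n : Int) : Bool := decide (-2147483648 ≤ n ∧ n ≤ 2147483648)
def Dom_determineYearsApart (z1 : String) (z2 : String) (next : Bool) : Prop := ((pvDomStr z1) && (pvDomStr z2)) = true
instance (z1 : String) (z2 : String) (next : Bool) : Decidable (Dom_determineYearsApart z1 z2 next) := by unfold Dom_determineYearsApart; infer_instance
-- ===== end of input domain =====

-- B replaces A's stepping while-loop with a closed-form modular formula on the two dict indices (simpler).
-- ===== PORT A =====
def zodiacYears : List String :=
  ["Ox", "Tiger", "Rabbit", "Dragon", "Snake", "Horse", "Goat", "Monkey", "Rooster", "Dog", "Pig", "Rat"]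

def zodiacDict : PySem.Dict String Int :=
  PySem.Dict.ofList
    [("Ox",0), ("Tiger",1), ("Rabbit",2), ("Dragon",3), ("Snake",4), ("Horse",5), ("Goat",6), ("Monkey",7),
     ("Rooster",8), ("Dog",9), ("Pig",10), ("Rat",11)]

-- A's 'while True' loop: under Pre_ it returns within at most 12 iterations, so fuel 13 suffices
-- (on inputs outside Pre_ the Python loop never returns; the fuel-out value 0 is never claimed about).
def determineYearsApartLoop (z2 : String) (next : Bool) : Nat → Int → Int → Int
  | 0, _, _ => 0
  | fuel + 1, curindex, years =>
    if PySem.List.pyGet? zodiacYears curindex = some z2 ∧ years ≠ 0 then years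
    else if next then
      determineYearsApartLoop z2 next fuel (PySem.Int.mod (curindex + 1) 12) (years + 1)
    else
      determineYearsApartLoop z2 next fuel (if curindex = 0 then 11 else curindex - 1) (years - 1)

def determineYearsApart (z1 : String) (z2 : String) (next : Bool) : Int :=
  match PySem.Dict.get? zodiacDict z1 with
  | none => 0   -- Python raises KeyError here; excluded by Pre_
  | some curindex => determineYearsApartLoop z2 next 13 curindex 0

-- ===== PORT B =====
def determineYearsApart_alt (z1 : String) (z2 : String) (next : Bool) : Int :=
  match PySem.Dict.get? zodiacDict z1, PySem.Dict.get? zodiacDict z2 with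
  | some i1, some i2 =>
    if next then PySem.Int.mod (i2 - i1 - 1) 12 + 1
    else -(PySem.Int.mod (i1 - i2 - 1) 12 + 1)
  | _, _ => 0   -- Python raises KeyError here; excluded by Pre_

-- ===== PRECONDITION & SPEC =====
-- Pre_ excludes invalid zodiac names: on a z1 not in the dict A raises KeyError, and on a
-- z2 not in the list A's while-loop never terminates (it scans the cycle forever).
def Pre_determineYearsApart (z1 : String) (z2 : String) (next : Bool) : Prop :=
  z1 ∈ zodiacYears ∧ z2 ∈ zodiacYears
instance (z1 : String) (z2 : String) (next : Bool) : Decidable (Pre_determineYearsApart z1 z2 next) := by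
  unfold Pre_determineYearsApart; infer_instance

def pvWitness_determineYearsApart : String × String × Bool := ("Ox", "Tiger", true)

def Spec_determineYearsApart (z1 : String) (z2 : String) (next : Bool) (out : Int) : Prop := out = determineYearsApart_alt z1 z2 next
instance (z1 : String) (z2 : String) (next : Bool) (out : Int) : Decidable (Spec_determineYearsApart z1 z2 next out) := by unfold Spec_determineYearsApart; infer_instance

-- ===== CLAIM (what is proved, stated in full; the proofs are below) =====
def Claim_equal_determineYearsApart : Prop := ∀ (z1 : String) (z2 : String) (next : Bool), Dom_determineYearsApart z1 z2 next → Pre_determineYearsApart z1 z2 next → Spec_determineYearsApart z1 z2 next (determineYearsApart z1 z2 next)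

-- ===== LEMMAS AND PROOFS =====

-- integer mirror of A's loop: used only to prove the transfer lemma (z2 replaced by its index)
def loopI (i2 : Int) (next : Bool) : Nat → Int → Int → Int
  | 0, _, _ => 0
  | fuel + 1, curindex, years =>
    if curindex = i2 ∧ years ≠ 0 then years
    else if next then
      loopI i2 next fuel (PySem.Int.mod (curindex + 1) 12) (years + 1)
    else
      loopI i2 next fuel (if curindex = 0 then 11 else curindex - 1) (years - 1)

-- a valid zodiac name has an index: dict lookup yields it, and list indexing inverts it
theorem zodiac_lookup (z : String) (hz : z ∈ zodiacYears) :
    ∃ i : Int, 0 ≤ i ∧ i < 12 ∧ PySem.Dict.get? zodiacDict z = some i ∧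
      ∀ c : Int, 0 ≤ c → c < 12 → (PySem.List.pyGet? zodiacYears c = some z ↔ c = i) := by
  simp only [zodiacYears, List.mem_cons, List.not_mem_nil, or_false] at hz
  rcases hz with rfl|rfl|rfl|rfl|rfl|rfl|rfl|rfl|rfl|rfl|rfl|rfl <;> first
    | exact ⟨0, by norm_num, by norm_num, by decide, fun c hc1 hc2 => by interval_cases c <;> decide⟩
    | exact ⟨1, by norm_num, by norm_num, by decide, fun c hc1 hc2 => by interval_cases c <;> decide⟩
    | exact ⟨2, by norm_num, by norm_num, by decide, fun c hc1 hc2 => by interval_cases c <;> decide⟩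
    | exact ⟨3, by norm_num, by norm_num, by decide, fun c hc1 hc2 => by interval_cases c <;> decide⟩
    | exact ⟨4, by norm_num, by norm_num, by decide, fun c hc1 hc2 => by interval_cases c <;> decide⟩
    | exact ⟨5, by norm_num, by norm_num, by decide, fun c hc1 hc2 => by interval_cases c <;> decide⟩
    | exact ⟨6, by norm_num, by norm_num, by decide, fun c hc1 hc2 => by interval_cases c <;> decide⟩
    | exact ⟨7, by norm_num, by norm_num, by decide, fun c hc1 hc2 => by interval_cases c <;> decide⟩
    | exact ⟨8, by norm_num, by norm_num, by decide, fun c hc1 hc2 => by interval_cases c <;> decide⟩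
    | exact ⟨9, by norm_num, by norm_num, by decide, fun c hc1 hc2 => by interval_cases c <;> decide⟩
    | exact ⟨10, by norm_num, by norm_num, by decide, fun c hc1 hc2 => by interval_cases c <;> decide⟩
    | exact ⟨11, by norm_num, by norm_num, by decide, fun c hc1 hc2 => by interval_cases c <;> decide⟩

theorem mod12_bounds (c : Int) : 0 ≤ PySem.Int.mod c 12 ∧ PySem.Int.mod c 12 < 12 := by
  rw [PySem.Int.mod_eq_emod_of_pos (by norm_num)]
  exact ⟨Int.emod_nonneg c (by norm_num), Int.emod_lt_of_pos c (by norm_num)⟩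

-- transfer: when z2 sits at index i2, A's string loop equals the integer loop
theorem loop_eq_loopI (z2 : String) (i2 : Int)
    (hiff : ∀ c : Int, 0 ≤ c → c < 12 → (PySem.List.pyGet? zodiacYears c = some z2 ↔ c = i2))
    (next : Bool) :
    ∀ (fuel : Nat) (c y : Int), 0 ≤ c → c < 12 →
      determineYearsApartLoop z2 next fuel c y = loopI i2 next fuel c y := by
  intro fuel
  induction fuel with
  | zero => intro c y _ _; rfl
  | succ f ih =>
    intro c y hc1 hc2
    simp only [determineYearsApartLoop, loopI, hiff c hc1 hc2]
    split
    · rfl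
    · split
      · exact ih _ _ (mod12_bounds (c + 1)).1 (mod12_bounds (c + 1)).2
      · exact ih _ _ (by split <;> omega) (by split <;> omega)

-- closed form of the integer loop on all 12 × 12 index pairs
theorem loopI_closed (i1 i2 : Int) (h10 : 0 ≤ i1) (h11 : i1 < 12) (h20 : 0 ≤ i2) (h21 : i2 < 12)
    (next : Bool) :
    loopI i2 next 13 i1 0 =
      if next then PySem.Int.mod (i2 - i1 - 1) 12 + 1 else -(PySem.Int.mod (i1 - i2 - 1) 12 + 1) := by
  interval_cases i1 <;> interval_cases i2 <;> cases next <;> decide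

-- ===== VERDICT (by name: the statement is the Claim_ definition above) =====
theorem determineYearsApart_spec : Claim_equal_determineYearsApart := by
  intro z1 z2 next _ hpre
  obtain ⟨h1, h2⟩ := hpre
  obtain ⟨i1, h10, h11, hg1, _⟩ := zodiac_lookup z1 h1
  obtain ⟨i2, h20, h21, hg2, hiff2⟩ := zodiac_lookup z2 h2
  unfold Spec_determineYearsApart determineYearsApart determineYearsApart_alt
  rw [hg1, hg2]
  simp only
  rw [loop_eq_loopI z2 i2 hiff2 next 13 i1 0 h10 h11]
  exact loopI_closed i1 i2 h10 h11 h20 h21 next
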